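-- pv_equiv track=rewrite | github.com/mrcepid-rap/mrcepid-filterbcf | test/scripts/generate_test_values.py | calc_ac
-- ===== SOURCE A (Python) =====
-- def calc_ac(vec):
--
--     tot_ac_zero = 0
--     for gt_n, gt in enumerate(vec):
--         if gt == '0/1':
--             tot_ac_zero += 1
--         elif gt == '1/1':
--             tot_ac_zero += 2
--         else:
--             pass
--     return tot_ac_zero
-- ===== SOURCE B (Python) =====
-- def calc_ac(vec):
--     return vec.count('0/1') + 2 * vec.count('1/1')
-- ===== Notes on version B (the rewrite author's own statement) =====
-- stated objective: simpler
-- what changed: Replaces the accumulating branch-loop with a counting closed form: count('0/1') + 2*count('1/1').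
import Mathlib
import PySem

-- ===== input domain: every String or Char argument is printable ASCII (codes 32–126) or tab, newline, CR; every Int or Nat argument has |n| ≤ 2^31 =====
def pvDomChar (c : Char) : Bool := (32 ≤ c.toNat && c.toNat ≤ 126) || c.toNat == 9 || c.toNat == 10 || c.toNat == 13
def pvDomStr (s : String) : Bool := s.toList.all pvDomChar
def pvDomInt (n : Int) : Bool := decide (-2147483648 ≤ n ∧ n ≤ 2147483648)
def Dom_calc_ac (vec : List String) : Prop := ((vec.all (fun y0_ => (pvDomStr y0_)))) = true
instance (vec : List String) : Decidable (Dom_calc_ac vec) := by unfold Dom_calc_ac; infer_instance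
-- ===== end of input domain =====

-- ===== PORT A =====
-- Port of A: enumerate loop with running accumulator
def calc_ac (vec : List String) : Int :=
  (PySem.List.enumerate vec).foldl (fun tot_ac_zero p =>
    if p.2 == "0/1" then tot_ac_zero + 1
    else if p.2 == "1/1" then tot_ac_zero + 2
    else tot_ac_zero) 0

-- ===== PORT B =====
-- Port of B: closed-form counts. B changes the accumulator loop into two count scans (objective: simpler).
def calc_ac_alt (vec : List String) : Int :=
  (PySem.List.count vec "0/1" : Int) + 2 * (PySem.List.count vec "1/1" : Int)

-- ===== PRECONDITION & SPEC =====
def Spec_calc_ac (vec : List String) (out : Int) : Prop := out = calc_ac_alt vec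
instance (vec : List String) (out : Int) : Decidable (Spec_calc_ac vec out) := by unfold Spec_calc_ac; infer_instance

-- ===== CLAIM (what is proved, stated in full; the proofs are below) =====
def Claim_equal_calc_ac : Prop := ∀ (vec : List String), Dom_calc_ac vec → Spec_calc_ac vec (calc_ac vec)

-- ===== LEMMAS AND PROOFS =====

-- ===== VERDICT (by name: the statement is the Claim_ definition above) =====
theorem calc_ac_loop (vec : List String) (n : Int) (a : Int) :
    (PySem.List.enumerate vec n).foldl (fun tot p =>
      if p.2 == "0/1" then tot + 1
      else if p.2 == "1/1" then tot + 2
      else tot) a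
    = a + (vec.count "0/1" : Int) + 2 * (vec.count "1/1" : Int) := by
  induction vec generalizing n a with
  | nil => simp [PySem.List.enumerate_nil]
  | cons x xs ih =>
      rw [PySem.List.enumerate_cons, List.foldl_cons, ih]
      by_cases h1 : x = "0/1"
      · simp [h1]; ring
      · by_cases h2 : x = "1/1"
        · simp [h2]; ring
        · simp [h1, h2]

theorem calc_ac_spec : Claim_equal_calc_ac := by
  intro vec _
  unfold Spec_calc_ac calc_ac calc_ac_alt
  rw [calc_ac_loop]
  simp [PySem.List.count_eq]
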